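-- pv_equiv track=rewrite | github.com/michaelmdeng/advent-of-code | python/y2018/day7.py | finish_steps
-- ===== SOURCE A (Python) =====
-- def finish_steps(adj, rev_adj, nodes, steps):
--     for step in steps:
--         if step in adj:
--             adj.pop(step)
--         to_remove = []
--         for key in rev_adj:
--             if step in rev_adj[key]:
--                 rev_adj[key].pop(step)
--                 if len(rev_adj[key].keys()) == 0:
--                     to_remove += [key]
--         for remove in to_remove:
--             rev_adj.pop(remove)
--
--     return(adj, rev_adj, nodes)
-- ===== SOURCE B (Python) =====
-- def finish_steps(adj, rev_adj, nodes, steps):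
--     # One pass with a set of finished steps; does not mutate its arguments
--     # (A mutates adj/rev_adj in place; equivalence is about the return value).
--     done = set(steps)
--     new_adj = {k: v for k, v in adj.items() if k not in done}
--     new_rev = {}
--     for k, inner in rev_adj.items():
--         if not inner:
--             new_rev[k] = inner
--         else:
--             new_inner = {ik: iv for ik, iv in inner.items() if ik not in done}
--             if new_inner:
--                 new_rev[k] = new_inner
--     return (new_adj, new_rev, nodes)
-- ===== Notes on version B (the rewrite author's own statement) =====
-- stated objective: faster
-- what changed: B makes one pass over adj and rev_adj using a set of finished steps (keep an entry iff its key / some inner key survives), instead of A's per-step rescan of every rev_adj entry; B also does not mutate its arguments.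
import Mathlib
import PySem

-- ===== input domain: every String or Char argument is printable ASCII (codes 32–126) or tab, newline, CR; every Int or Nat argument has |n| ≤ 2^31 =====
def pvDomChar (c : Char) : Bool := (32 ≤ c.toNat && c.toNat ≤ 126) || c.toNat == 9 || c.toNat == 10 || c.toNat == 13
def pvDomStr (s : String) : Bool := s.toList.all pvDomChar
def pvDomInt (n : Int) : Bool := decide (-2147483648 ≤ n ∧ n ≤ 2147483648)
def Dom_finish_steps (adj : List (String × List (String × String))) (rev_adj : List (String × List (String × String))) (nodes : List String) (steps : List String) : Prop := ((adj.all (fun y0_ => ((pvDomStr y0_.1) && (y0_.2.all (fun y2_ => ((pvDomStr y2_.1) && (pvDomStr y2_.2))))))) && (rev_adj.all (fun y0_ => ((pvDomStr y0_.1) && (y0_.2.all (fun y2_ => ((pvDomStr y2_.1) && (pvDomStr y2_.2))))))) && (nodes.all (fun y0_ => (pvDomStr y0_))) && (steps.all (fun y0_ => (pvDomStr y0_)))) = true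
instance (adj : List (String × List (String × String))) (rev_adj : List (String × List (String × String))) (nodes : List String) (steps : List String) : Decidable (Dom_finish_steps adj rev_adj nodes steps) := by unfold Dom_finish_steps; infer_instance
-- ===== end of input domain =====

-- ===== PORT A =====
-- B replaces A's per-step rescan of every rev_adj entry by one pass with a set of finished
-- steps (objective: faster). Equivalence is about the return value: Python A mutates
-- adj/rev_adj in place, B does not.
-- Dicts are PySem.Dict wrapped around the assoc-list arguments.
-- Inner loop of A: `for key in rev_adj: if step in rev_adj[key]: ...` (keys are not
-- mutated during the loop, so iterating the snapshot of keys is exact).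
def pvRevLoopA (step : String)
    (st : PySem.Dict String (PySem.Dict String String) × List String) (key : String) :
    PySem.Dict String (PySem.Dict String String) × List String :=
  let inner := st.1.getD key PySem.Dict.empty   -- rev_adj[key]; key comes from st.1.keys, so the default is never used
  if inner.contains step then
    let inner' := inner.erase step              -- rev_adj[key].pop(step), written back in place
    let st1 := st.1.insert key inner'
    if inner'.items.length = 0 then (st1, st.2 ++ [key]) else (st1, st.2)
  else st

-- body of `for step in steps`
def pvStepA
    (st : PySem.Dict String (PySem.Dict String String) × PySem.Dict String (PySem.Dict String String))
    (step : String) :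
    PySem.Dict String (PySem.Dict String String) × PySem.Dict String (PySem.Dict String String) :=
  let adj := if st.1.contains step then st.1.erase step else st.1   -- if step in adj: adj.pop(step)
  let pr := (st.2.keys).foldl (pvRevLoopA step) (st.2, [])
  let rev := pr.2.foldl (fun r k => r.erase k) pr.1                 -- for remove in to_remove: rev_adj.pop(remove)
  (adj, rev)

def finish_steps (adj : List (String × List (String × String))) (rev_adj : List (String × List (String × String))) (nodes : List String) (steps : List String) : (List (String × List (String × String))) × (List (String × List (String × String))) × List String :=
  let a0 := PySem.Dict.mk (adj.map (fun kv => (kv.1, PySem.Dict.mk kv.2)))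
  let r0 := PySem.Dict.mk (rev_adj.map (fun kv => (kv.1, PySem.Dict.mk kv.2)))
  let fin := steps.foldl pvStepA (a0, r0)
  (fin.1.items.map (fun kv => (kv.1, kv.2.items)),
   fin.2.items.map (fun kv => (kv.1, kv.2.items)),
   nodes)

-- ===== PORT B =====
def finish_steps_alt (adj : List (String × List (String × String))) (rev_adj : List (String × List (String × String))) (nodes : List String) (steps : List String) : (List (String × List (String × String))) × (List (String × List (String × String))) × List String :=
  let done : PySem.Set String := PySem.Set.ofList steps
  let adj' := adj.filter (fun kv => !done.contains kv.1)
  let rev' := rev_adj.foldl (fun acc kv =>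
      if kv.2.isEmpty then acc ++ [kv]
      else
        let inner' := kv.2.filter (fun p => !done.contains p.1)
        if inner'.isEmpty then acc else acc ++ [(kv.1, inner')]) []
  (adj', rev', nodes)

-- ===== PRECONDITION & SPEC =====
-- Pre_ excludes association lists with duplicate keys (outer, or inside an inner value):
-- such lists do not represent Python dicts (the dict abstraction collapses them), so no
-- Python input corresponds to them; every input drawn from actual dicts satisfies Pre_.
def Pre_finish_steps (adj : List (String × List (String × String))) (rev_adj : List (String × List (String × String))) (nodes : List String) (steps : List String) : Prop :=
  (adj.map Prod.fst).Nodup ∧ (∀ kv ∈ adj, (kv.2.map Prod.fst).Nodup) ∧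
  (rev_adj.map Prod.fst).Nodup ∧ (∀ kv ∈ rev_adj, (kv.2.map Prod.fst).Nodup)
instance (adj : List (String × List (String × String))) (rev_adj : List (String × List (String × String))) (nodes : List String) (steps : List String) : Decidable (Pre_finish_steps adj rev_adj nodes steps) := by unfold Pre_finish_steps; infer_instance

def pvWitness_finish_steps : (List (String × List (String × String))) × (List (String × List (String × String))) × List String × List String :=
  ([("a", [("b", "e")])], [("b", [("a", "e")])], ["a", "b"], ["a"])

def Spec_finish_steps (adj : List (String × List (String × String))) (rev_adj : List (String × List (String × String))) (nodes : List String) (steps : List String) (out : (List (String × List (String × String))) × (List (String × List (String × String))) × List String) : Prop := out = finish_steps_alt adj rev_adj nodes steps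
instance (adj : List (String × List (String × String))) (rev_adj : List (String × List (String × String))) (nodes : List String) (steps : List String) (out : (List (String × List (String × String))) × (List (String × List (String × String))) × List String) : Decidable (Spec_finish_steps adj rev_adj nodes steps out) := by unfold Spec_finish_steps; infer_instance

-- ===== CLAIM (what is proved, stated in full; the proofs are below) =====
def Claim_equal_finish_steps : Prop := ∀ (adj : List (String × List (String × String))) (rev_adj : List (String × List (String × String))) (nodes : List String) (steps : List String), Dom_finish_steps adj rev_adj nodes steps → Pre_finish_steps adj rev_adj nodes steps → Spec_finish_steps adj rev_adj nodes steps (finish_steps adj rev_adj nodes steps)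

-- ===== LEMMAS AND PROOFS =====
theorem pv_foldl_erase {ν : Type} (ks : List String) (d : PySem.Dict String ν) :
    (ks.foldl (fun r k => r.erase k) d).items
      = d.items.filter (fun kv => !ks.contains kv.1) := by
  induction ks generalizing d with
  | nil => simp
  | cons k ks ih =>
    rw [List.foldl_cons, ih]
    show List.filter _ (d.erase k).items = _
    simp only [PySem.Dict.erase, List.filter_filter]
    congr 1
    funext kv
    simp only [List.contains_cons, Bool.not_or]
    rw [Bool.and_comm, BEq.comm]

theorem pv_eraseIf_items {ν : Type} (s : String) (d : PySem.Dict String ν) :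
    (if d.contains s then d.erase s else d).items
      = d.items.filter (fun p => !(p.1 == s)) := by
  by_cases h : d.contains s = true
  · simp [h, PySem.Dict.erase]
  · rw [if_neg h, eq_comm, List.filter_eq_self]
    intro p hp
    simp only [PySem.Dict.contains, List.any_eq_true] at h
    simp only [Bool.not_eq_true']
    exact Bool.eq_false_iff.mpr (fun hc => h ⟨p, hp, hc⟩)

theorem pv_get?_mid {ν : Type} (M L : List (String × ν)) (kv : String × ν)
    (hM : kv.1 ∉ M.map Prod.fst) :
    (PySem.Dict.mk (M ++ kv :: L)).get? kv.1 = some kv.2 := by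
  have h1 : List.find? (fun p => p.1 == kv.1) M = none := by
    rw [List.find?_eq_none]
    intro p hp he
    exact hM (eq_of_beq he ▸ List.mem_map_of_mem hp)
  show Option.map _ (List.find? _ (M ++ kv :: L)) = _
  rw [List.find?_append, h1, Option.none_or, List.find?_cons_of_pos (by simp)]
  rfl

theorem pv_contains_mid {ν : Type} (M L : List (String × ν)) (kv : String × ν) :
    (PySem.Dict.mk (M ++ kv :: L)).contains kv.1 = true := by
  simp [PySem.Dict.contains]

theorem pv_insert_mid {ν : Type} (M L : List (String × ν)) (kv : String × ν) (v : ν)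
    (hM : kv.1 ∉ M.map Prod.fst) (hL : kv.1 ∉ L.map Prod.fst) :
    (PySem.Dict.mk (M ++ kv :: L)).insert kv.1 v = PySem.Dict.mk (M ++ (kv.1, v) :: L) := by
  simp only [PySem.Dict.insert, pv_contains_mid, if_pos]
  congr 1
  rw [List.map_append, List.map_cons]
  have hself : (kv.1 == kv.1) = true := by simp
  rw [hself]
  congr 1
  · apply List.map_congr_left ?_ |>.trans (List.map_id M)
    intro p hp
    have : (p.1 == kv.1) = false := by
      simp only [beq_eq_false_iff_ne, ne_eq]
      exact fun he => hM (he ▸ List.mem_map_of_mem hp)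
    simp [this]
  · simp only [if_pos]
    congr 1
    apply List.map_congr_left ?_ |>.trans (List.map_id L)
    intro p hp
    have : (p.1 == kv.1) = false := by
      simp only [beq_eq_false_iff_ne, ne_eq]
      exact fun he => hL (he ▸ List.mem_map_of_mem hp)
    simp [this]

def pvH (s : String) (kv : String × PySem.Dict String String) : String × PySem.Dict String String :=
  if kv.2.contains s then (kv.1, kv.2.erase s) else kv

def pvBad (s : String) (kv : String × PySem.Dict String String) : Bool :=
  kv.2.contains s && (kv.2.erase s).items.length == 0

theorem pv_revloop_invariant (s : String) (L M : List (String × PySem.Dict String String)) (tr : List String)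
    (h : ((M ++ L).map Prod.fst).Nodup) :
    (L.map Prod.fst).foldl (pvRevLoopA s) (PySem.Dict.mk (M ++ L), tr)
      = (PySem.Dict.mk (M ++ L.map (pvH s)), tr ++ (L.filter (pvBad s)).map Prod.fst) := by
  induction L generalizing M tr with
  | nil => simp
  | cons kv L ih =>
    have hMn : kv.1 ∉ M.map Prod.fst := by
      simp only [List.map_append, List.nodup_append, List.map_cons] at h
      exact fun hm => h.2.2 kv.1 hm kv.1 (by simp) rfl
    have hLn : kv.1 ∉ L.map Prod.fst := by
      have := h
      simp only [List.map_append, List.nodup_append, List.map_cons, List.nodup_cons] at this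
      exact this.2.1.1
    have hget : (PySem.Dict.mk (M ++ kv :: L)).getD kv.1 PySem.Dict.empty = kv.2 := by
      rw [PySem.Dict.getD_eq_get?_getD, pv_get?_mid M L kv hMn]; rfl
    rw [List.map_cons, List.foldl_cons]
    by_cases hc : kv.2.contains s = true
    · have hstep : pvRevLoopA s (PySem.Dict.mk (M ++ kv :: L), tr) kv.1
          = (PySem.Dict.mk ((M ++ [(kv.1, kv.2.erase s)]) ++ L),
             if (kv.2.erase s).items.length = 0 then tr ++ [kv.1] else tr) := by
        unfold pvRevLoopA
        simp only [hget, hc, if_pos, pv_insert_mid M L kv _ hMn hLn]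
        by_cases hlen : (kv.2.erase s).items.length = 0
        · simp [hlen]
        · simp [hlen]
      rw [hstep]
      have hnd' : (((M ++ [(kv.1, kv.2.erase s)]) ++ L).map Prod.fst).Nodup := by
        have : ((M ++ [(kv.1, kv.2.erase s)]) ++ L).map Prod.fst = (M ++ kv :: L).map Prod.fst := by
          simp
        rw [this]; exact h
      rw [ih ((M ++ [(kv.1, kv.2.erase s)])) _ hnd']
      simp only [List.map_cons, List.filter_cons, pvH, pvBad, hc, if_pos, Bool.true_and]
      by_cases hlen : (kv.2.erase s).items.length = 0
      · simp [hlen]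
      · simp [hlen, List.append_assoc]
    · have hstep : pvRevLoopA s (PySem.Dict.mk (M ++ kv :: L), tr) kv.1
          = (PySem.Dict.mk ((M ++ [kv]) ++ L), tr) := by
        unfold pvRevLoopA
        simp [hget, hc]
      rw [hstep]
      have hnd' : (((M ++ [kv]) ++ L).map Prod.fst).Nodup := by
        simpa using h
      rw [ih (M ++ [kv]) _ hnd']
      simp [pvH, pvBad, hc]

def pvG (s : String) (kv : String × PySem.Dict String String) : Option (String × PySem.Dict String String) :=
  if kv.2.contains s then
    let i' := kv.2.erase s
    if i'.items.length = 0 then none else some (kv.1, i')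
  else some kv

theorem pvH_fst (s : String) (kv : String × PySem.Dict String String) : (pvH s kv).1 = kv.1 := by
  unfold pvH; split <;> rfl

theorem pv_filter_map_eq_filterMap (s : String) (L : List (String × PySem.Dict String String))
    (ks : List String) (hcond : ∀ kv ∈ L, ks.contains kv.1 = pvBad s kv) :
    (L.map (pvH s)).filter (fun kv => !ks.contains kv.1) = L.filterMap (pvG s) := by
  induction L with
  | nil => simp
  | cons kv L ih =>
    rw [List.map_cons, List.filter_cons, List.filterMap_cons]
    have hk : ks.contains (pvH s kv).1 = pvBad s kv := by
      rw [pvH_fst]; exact hcond kv (by simp)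
    have ih' : List.filter (fun kv => !decide (kv.1 ∈ ks)) (List.map (pvH s) L)
        = List.filterMap (pvG s) L := by
      simpa using ih (fun kv h => hcond kv (by simp [h]))
    by_cases hb : pvBad s kv = true
    · have hG : pvG s kv = none := by
        unfold pvBad at hb
        simp only [Bool.and_eq_true, beq_iff_eq] at hb
        unfold pvG
        simp [hb.1, hb.2]
      have hmem : (pvH s kv).1 ∈ ks := List.mem_of_elem_eq_true (hk.trans hb)
      simp [hmem, hG, ih']
    · have hbf : pvBad s kv = false := by simpa using hb
      have hG : pvG s kv = some (pvH s kv) := by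
        unfold pvBad at hbf
        unfold pvG pvH
        by_cases hc : kv.2.contains s = true
        · simp only [hc, Bool.true_and, beq_eq_false_iff_ne, ne_eq] at hbf
          simp [hc, hbf]
        · simp only [Bool.not_eq_true] at hc
          simp [hc]
      have hmem : (pvH s kv).1 ∉ ks := by
        intro hm
        have hc : ks.contains (pvH s kv).1 = true := List.elem_eq_true_of_mem hm
        rw [hc] at hk
        exact hb hk.symm
      simp [hmem, hG, ih']

theorem pv_badkeys_cond (s : String) (L : List (String × PySem.Dict String String))
    (h : (L.map Prod.fst).Nodup) :
    ∀ kv ∈ L, ((L.filter (pvBad s)).map Prod.fst).contains kv.1 = pvBad s kv := by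
  intro kv hkv
  by_cases hb : pvBad s kv = true
  · rw [hb]
    exact List.elem_eq_true_of_mem (List.mem_map_of_mem (List.mem_filter.mpr ⟨hkv, hb⟩))
  · rw [Bool.eq_false_iff.mpr hb]
    rw [Bool.eq_false_iff]
    intro hc
    have hm := List.mem_of_elem_eq_true hc
    obtain ⟨kv', hkv', heq⟩ := List.mem_map.mp hm
    have hkv'L := (List.mem_filter.mp hkv').1
    have hbad' := (List.mem_filter.mp hkv').2
    have : kv' = kv := List.inj_on_of_nodup_map h hkv'L hkv heq
    exact hb (this ▸ hbad')

theorem pv_step_rev (s : String) (r a : PySem.Dict String (PySem.Dict String String))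
    (h : (r.items.map Prod.fst).Nodup) :
    (pvStepA (a, r) s).2.items = r.items.filterMap (pvG s) := by
  unfold pvStepA
  have heta : (PySem.Dict.mk r.items) = r := rfl
  have hinv := pv_revloop_invariant s r.items [] [] (by simpa using h)
  simp only [List.nil_append, heta] at hinv
  show (List.foldl _ (List.foldl (pvRevLoopA s) (r, []) (r.items.map Prod.fst)).1
      (List.foldl (pvRevLoopA s) (r, []) (r.items.map Prod.fst)).2).items = _
  rw [hinv]
  rw [pv_foldl_erase]
  exact pv_filter_map_eq_filterMap s r.items _ (pv_badkeys_cond s r.items h)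

def pvGB (ss : List String) (kv : String × PySem.Dict String String) : Option (String × PySem.Dict String String) :=
  if kv.2.items = [] then some kv
  else
    let i' := kv.2.items.filter (fun p => !ss.contains p.1)
    if i' = [] then none else some (kv.1, PySem.Dict.mk i')

theorem pvGB_nil (kv : String × PySem.Dict String String) : pvGB [] kv = some kv := by
  unfold pvGB
  by_cases h : kv.2.items = []
  · simp [h]
  · simp [h]

theorem pv_G_bind (s : String) (ss : List String) (kv : String × PySem.Dict String String) :
    pvGB (s :: ss) kv = (pvG s kv).bind (pvGB ss) := by
  have hfilters : kv.2.items.filter (fun p => !(s :: ss).contains p.1)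
      = (kv.2.items.filter (fun p => !(p.1 == s))).filter (fun p => !ss.contains p.1) := by
    rw [List.filter_filter]
    congr 1
    funext p
    simp only [List.contains_cons, Bool.not_or]
    rw [Bool.and_comm, BEq.comm]
  by_cases h0 : kv.2.items = []
  · have hc : kv.2.contains s = false := by
      simp [PySem.Dict.contains, h0]
    unfold pvGB pvG
    simp [h0, hc]
  · by_cases hc : kv.2.contains s = true
    · have hne : (kv.2.erase s).items = kv.2.items.filter (fun p => !(p.1 == s)) := rfl
      by_cases hlen : (kv.2.erase s).items.length = 0
      · -- inner becomes empty: A drops the key; B's filtered inner is empty too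
        have hnil : kv.2.items.filter (fun p => !(p.1 == s)) = [] := by
          rw [← hne]; exact List.length_eq_zero_iff.mp hlen
        have hGnone : pvG s kv = none := by unfold pvG; simp [hc, hlen]
        rw [hGnone]
        unfold pvGB
        simp only [h0, hfilters, hnil, List.filter_nil, if_pos]
        rfl
      · have hGsome : pvG s kv = some (kv.1, kv.2.erase s) := by unfold pvG; simp [hc, hlen]
        rw [hGsome]
        have h0' : (kv.2.erase s).items ≠ [] := fun he => hlen (by simp [he])
        unfold pvGB
        simp only [h0, hfilters, ← hne]
        simp [h0']
    · have hid : kv.2.items.filter (fun p => !(p.1 == s)) = kv.2.items := by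
        rw [List.filter_eq_self]
        intro p hp
        simp only [Bool.not_eq_true', beq_eq_false_iff_ne, ne_eq]
        intro he
        exact hc (by simp only [PySem.Dict.contains, List.any_eq_true]; exact ⟨p, hp, by simp [he]⟩)
      have hGsome : pvG s kv = some kv := by unfold pvG; simp [hc]
      rw [hGsome]
      unfold pvGB
      simp only [hfilters, hid, Option.bind_some]

theorem pv_nodup_filterMap (s : String) (L : List (String × PySem.Dict String String))
    (h : (L.map Prod.fst).Nodup) : ((L.filterMap (pvG s)).map Prod.fst).Nodup := by
  have hsub : ((L.filterMap (pvG s)).map Prod.fst).Sublist (L.map Prod.fst) := by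
    induction L with
    | nil => simp
    | cons kv L ih =>
      rw [List.filterMap_cons]
      cases hg : pvG s kv with
      | none => exact (ih (by simp at h ⊢; exact h.2)).cons _
      | some w =>
        have hw : w.1 = kv.1 := by
          unfold pvG at hg
          by_cases hc : kv.2.contains s = true
          · simp only [hc, if_pos] at hg
            by_cases hl : (kv.2.erase s).items.length = 0
            · simp [hl] at hg
            · simp only [hl, if_false, Option.some.injEq] at hg
              cases hg; rfl
          · simp only [Bool.not_eq_true] at hc
            simp only [hc, Bool.false_eq_true, if_false, Option.some.injEq] at hg
            cases hg; rfl
        rw [List.map_cons, List.map_cons, hw]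
        exact (ih (by simp at h ⊢; exact h.2)).cons₂ _
  exact h.sublist hsub

theorem pv_main_fold (ss : List String) (a r : PySem.Dict String (PySem.Dict String String))
    (h : (r.items.map Prod.fst).Nodup) :
    ss.foldl pvStepA (a, r)
      = (PySem.Dict.mk (a.items.filter (fun kv => !ss.contains kv.1)),
         PySem.Dict.mk (r.items.filterMap (pvGB ss))) := by
  induction ss generalizing a r with
  | nil =>
    have hf : pvGB ([] : List String) = some := funext pvGB_nil
    simp only [List.foldl_nil, hf, List.filterMap_some]
    have h1 : (PySem.Dict.mk (a.items.filter (fun kv => !(([]:List String).contains kv.1)))) = a := by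
      apply PySem.Dict.ext
      simp
    rw [h1]
  | cons s ss ih =>
    rw [List.foldl_cons]
    have h1 : (pvStepA (a, r) s).1 = PySem.Dict.mk (a.items.filter (fun p => !(p.1 == s))) := by
      apply PySem.Dict.ext
      exact pv_eraseIf_items s a
    have h2 : (pvStepA (a, r) s).2 = PySem.Dict.mk (r.items.filterMap (pvG s)) := by
      apply PySem.Dict.ext
      exact pv_step_rev s r a h
    have hstep : pvStepA (a, r) s
        = (PySem.Dict.mk (a.items.filter (fun p => !(p.1 == s))),
           PySem.Dict.mk (r.items.filterMap (pvG s))) := by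
      rw [← h1, ← h2]
    rw [hstep, ih _ _ (by exact pv_nodup_filterMap s r.items h)]
    congr 1
    · congr 1
      rw [List.filter_filter]
      congr 1
      funext kv
      simp only [List.contains_cons, Bool.not_or]
      rw [Bool.and_comm, BEq.comm]
    · congr 1
      rw [List.filterMap_filterMap]
      apply List.filterMap_congr ?_ |>.symm
      intro kv _
      exact pv_G_bind s ss kv

theorem pv_contains_ofList (xs : List String) (x : String) :
    (PySem.Set.ofList xs).contains x = xs.contains x := by
  by_cases h : x ∈ xs
  · have h1 : (PySem.Set.ofList xs).contains x = true :=
      List.elem_eq_true_of_mem ((PySem.Set.mem_ofList xs x).mpr h)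
    have h2 : xs.contains x = true := List.elem_eq_true_of_mem h
    rw [h1, h2]
  · rw [Bool.eq_iff_iff]
    constructor
    · intro hc
      exact absurd ((PySem.Set.mem_ofList xs x).mp (List.mem_of_elem_eq_true hc)) h
    · intro hc
      exact absurd (List.mem_of_elem_eq_true hc) h

theorem pv_b_fold (ss : PySem.Set String) (l acc : List (String × List (String × String))) :
    l.foldl (fun acc kv =>
      if kv.2.isEmpty then acc ++ [kv]
      else
        let inner' := kv.2.filter (fun p => !ss.contains p.1)
        if inner'.isEmpty then acc else acc ++ [(kv.1, inner')]) acc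
      = acc ++ l.filterMap (fun kv =>
          if kv.2.isEmpty then some kv
          else
            let inner' := kv.2.filter (fun p => !ss.contains p.1)
            if inner'.isEmpty then none else some (kv.1, inner')) := by
  induction l generalizing acc with
  | nil => simp
  | cons kv l ih =>
    rw [List.foldl_cons, List.filterMap_cons]
    by_cases h0 : kv.2.isEmpty
    · simp only [h0, if_pos, ih, List.append_assoc, List.singleton_append]
    · by_cases h1 : (kv.2.filter (fun p => !ss.contains p.1)).isEmpty
      · simp only [h0, h1, if_pos, ih]
        simp
      · simp only [h0, h1, ih]
        simp [List.append_assoc]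

theorem pv_GB_raw (steps : List String) (k : String) (i : List (String × String)) :
    (pvGB steps (k, PySem.Dict.mk i)).map (fun kv => (kv.1, kv.2.items))
      = (if i.isEmpty then some (k, i)
         else
           let inner' := i.filter (fun p => !(PySem.Set.ofList steps).contains p.1)
           if inner'.isEmpty then none else some (k, inner')) := by
  have hfe : i.filter (fun p => !(PySem.Set.ofList steps).contains p.1)
      = i.filter (fun p => !steps.contains p.1) := by
    congr 1
    funext p
    rw [pv_contains_ofList]
  show (if i = [] then some (k, PySem.Dict.mk i)
        else if i.filter (fun p => !steps.contains p.1) = [] then none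
        else some (k, PySem.Dict.mk (i.filter (fun p => !steps.contains p.1)))).map
          (fun kv => (kv.1, kv.2.items)) = _
  rw [hfe]
  simp only [List.isEmpty_iff]
  by_cases h0 : i = []
  · rw [if_pos h0, if_pos h0]
    subst h0
    rfl
  · rw [if_neg h0, if_neg h0]
    by_cases h1 : i.filter (fun p => !steps.contains p.1) = []
    · rw [if_pos h1, if_pos h1]
      rfl
    · rw [if_neg h1, if_neg h1]
      rfl

theorem pv_equal (adj rev_adj : List (String × List (String × String))) (nodes steps : List String)
    (hnd : (rev_adj.map Prod.fst).Nodup) :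
    finish_steps adj rev_adj nodes steps = finish_steps_alt adj rev_adj nodes steps := by
  have hr0 : (((rev_adj.map (fun kv => (kv.1, PySem.Dict.mk kv.2))).map Prod.fst)).Nodup := by
    rw [List.map_map]
    exact hnd
  refine Prod.ext ?_ (Prod.ext ?_ rfl)
  · show ((steps.foldl pvStepA
        (PySem.Dict.mk (adj.map (fun kv => (kv.1, PySem.Dict.mk kv.2))),
         PySem.Dict.mk (rev_adj.map (fun kv => (kv.1, PySem.Dict.mk kv.2))))).1.items.map
          (fun kv => (kv.1, kv.2.items)))
      = adj.filter (fun kv => !(PySem.Set.ofList steps).contains kv.1)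
    rw [pv_main_fold steps _ _ hr0]
    show ((adj.map (fun kv => (kv.1, PySem.Dict.mk kv.2))).filter
        (fun kv => !steps.contains kv.1)).map (fun kv => (kv.1, kv.2.items)) = _
    rw [List.filter_map, List.map_map]
    rw [show ((fun (kv : String × PySem.Dict String String) => (kv.1, kv.2.items)) ∘
        (fun (kv : String × List (String × String)) => (kv.1, PySem.Dict.mk kv.2)))
      = id from funext (fun kv => rfl), List.map_id]
    congr 1
    funext kv
    show (!steps.contains kv.1) = (!(PySem.Set.ofList steps).contains kv.1)
    rw [pv_contains_ofList]
  · show ((steps.foldl pvStepA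
        (PySem.Dict.mk (adj.map (fun kv => (kv.1, PySem.Dict.mk kv.2))),
         PySem.Dict.mk (rev_adj.map (fun kv => (kv.1, PySem.Dict.mk kv.2))))).2.items.map
          (fun kv => (kv.1, kv.2.items)))
      = rev_adj.foldl (fun acc kv =>
          if kv.2.isEmpty then acc ++ [kv]
          else
            let inner' := kv.2.filter (fun p => !(PySem.Set.ofList steps).contains p.1)
            if inner'.isEmpty then acc else acc ++ [(kv.1, inner')]) []
    rw [pv_main_fold steps _ _ hr0]
    show ((rev_adj.map (fun kv => (kv.1, PySem.Dict.mk kv.2))).filterMap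
        (pvGB steps)).map (fun kv => (kv.1, kv.2.items)) = _
    rw [pv_b_fold, List.nil_append, List.filterMap_map, List.map_filterMap]
    apply List.filterMap_congr
    intro kv _
    exact pv_GB_raw steps kv.1 kv.2

-- ===== VERDICT (by name: the statement is the Claim_ definition above) =====
theorem finish_steps_spec : Claim_equal_finish_steps := by
  intro adj rev_adj nodes steps _hdom hpre
  show finish_steps adj rev_adj nodes steps = finish_steps_alt adj rev_adj nodes steps
  exact pv_equal adj rev_adj nodes steps hpre.2.2.1
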